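-- pv_equiv track=rewrite | github.com/DNopenaire/Conversion_Calculator | Convertor_Calculator.py | decimal_vers_ip
-- ===== SOURCE A (Python) =====
-- def decimal_vers_ip(decimal_valeur):
--     try:
--         decimal_valeur = int(decimal_valeur)
--         if not (0 <= decimal_valeur <= 4294967295):
--             return "Erreur : Valeur décimale hors plage."
--         return '.'.join(str((decimal_valeur >> (8 * i)) & 255) for i in reversed(range(4)))
--     except ValueError:
--         return "Erreur : Entrée non valide."
-- ===== SOURCE B (Python) =====
-- def decimal_vers_ip(decimal_valeur):
--     try:
--         decimal_valeur = int(decimal_valeur)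
--     except ValueError:
--         return "Erreur : Entrée non valide."
--     if not (0 <= decimal_valeur <= 4294967295):
--         return "Erreur : Valeur décimale hors plage."
--     # Pack the value as its big-endian textual byte representation: 8 zero-padded
--     # lowercase hex digits, two per octet, then decode each 2-digit group.
--     h = format(decimal_valeur, '08x')
--     return '.'.join(str(int(h[i:i + 2], 16)) for i in (0, 2, 4, 6))
-- ===== Notes on version B (the rewrite author's own statement) =====
-- stated objective: alternative
-- what changed: Replaces A's per-octet shift-and-mask integer arithmetic with a textual byte-packing: format the validated value as zero-padded lowercase hexadecimal (format(n,'08x')) and decode each two-digit slice with int(.,16).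
import Mathlib
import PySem

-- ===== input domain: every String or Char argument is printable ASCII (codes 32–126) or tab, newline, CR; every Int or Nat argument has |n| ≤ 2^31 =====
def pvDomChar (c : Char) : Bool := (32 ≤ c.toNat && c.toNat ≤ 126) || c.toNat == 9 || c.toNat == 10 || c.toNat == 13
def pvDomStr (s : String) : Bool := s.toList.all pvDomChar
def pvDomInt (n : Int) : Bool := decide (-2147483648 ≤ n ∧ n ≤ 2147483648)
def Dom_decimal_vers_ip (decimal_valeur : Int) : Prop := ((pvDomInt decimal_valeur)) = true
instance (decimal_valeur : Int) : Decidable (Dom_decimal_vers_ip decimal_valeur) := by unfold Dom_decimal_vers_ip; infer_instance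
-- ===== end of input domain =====

-- B replaces A's per-octet shift/mask arithmetic by a textual byte-packing: format the
-- validated value as zero-padded lowercase hexadecimal and decode each two-digit group
-- (objective: alternative — a different representation, same cost).
-- The argument is already an Int, so int() is the identity and the ValueError branch is
-- unreachable: both ports are total.

-- ===== PORT A =====
-- 'decimal_valeur >> (8*i)' is Lean's '>>>' (i ∈ range(4) is nonneg, so (8*i).toNat is exact); '& 255' is PySem.Int.band.
def decimal_vers_ip (decimal_valeur : Int) : String :=
  if ¬ (0 ≤ decimal_valeur ∧ decimal_valeur ≤ 4294967295) then
    "Erreur : Valeur décimale hors plage."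
  else
    PySem.Str.join "." (((PySem.List.pyRange 0 4 1).reverse).map
      (fun i => PySem.Int.toStr (PySem.Int.band (decimal_valeur >>> (8 * i).toNat) 255)))

-- ===== PORT B =====
-- pvHexDigit d = the lowercase hex digit character for d < 16 (as format('x') prints it).
def pvHexDigit (d : Nat) : Char := Char.ofNat (if d < 10 then 48 + d else 87 + d)

-- Hand port of format(n, '08x'): eight zero-padded lowercase hex digits, big-endian.
-- Exact for 0 ≤ n ≤ 4294967295 (the only values it is applied to), where Python's
-- result is exactly these eight digits.
def pvHex8 (n : Nat) : List Char := (List.range 8).map (fun j => pvHexDigit (n / 16 ^ (7 - j) % 16))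

-- Value of one lowercase hex digit character; pvHexParse is the hand port of int(s, 16)
-- (left fold over the digits), exact on strings of lowercase hex digits such as the
-- slices of pvHex8 it is applied to.
def pvHexVal (c : Char) : Nat := if c.toNat ≤ 57 then c.toNat - 48 else c.toNat - 87

def pvHexParse (cs : List Char) : Int := cs.foldl (fun acc c => 16 * acc + (pvHexVal c : Int)) 0

def decimal_vers_ip_alt (decimal_valeur : Int) : String :=
  if ¬ (0 ≤ decimal_valeur ∧ decimal_valeur ≤ 4294967295) then
    "Erreur : Valeur décimale hors plage."
  else
    PySem.Str.join "." (([0, 2, 4, 6] : List Int).map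
      (fun i => PySem.Int.toStr (pvHexParse (PySem.List.slice (pvHex8 decimal_valeur.toNat) (some i) (some (i + 2))))))

-- ===== PRECONDITION & SPEC =====
def Spec_decimal_vers_ip (decimal_valeur : Int) (out : String) : Prop := out = decimal_vers_ip_alt decimal_valeur
instance (decimal_valeur : Int) (out : String) : Decidable (Spec_decimal_vers_ip decimal_valeur out) := by unfold Spec_decimal_vers_ip; infer_instance

-- ===== CLAIM (what is proved, stated in full; the proofs are below) =====
def Claim_equal_decimal_vers_ip : Prop := ∀ (decimal_valeur : Int), Dom_decimal_vers_ip decimal_valeur → Spec_decimal_vers_ip decimal_valeur (decimal_vers_ip decimal_valeur)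

-- ===== LEMMAS AND PROOFS =====

-- one byte of A: shift-and-mask equals mod-256 of the iterated quotient (on Nat-cast inputs)
lemma pv_byte (m k : Nat) :
    PySem.Int.band ((m : Int) >>> (8 * k)) 255 = ((m / 256 ^ k % 256 : Nat) : Int) := by
  have h1 : ((m : Int) >>> (8 * k)) = ((m >>> (8 * k) : Nat) : Int) := by simp
  have h2 : (m >>> (8 * k)) &&& 255 = m / 256 ^ k % 256 := by
    rw [Nat.shiftRight_eq_div_pow, Nat.and_two_pow_sub_one_eq_mod _ 8, pow_mul]
    norm_num
  rw [h1, ← h2]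
  exact_mod_cast PySem.Int.band_natCast (m >>> (8 * k)) 255

-- decoding the two hex digits of a value < 16 recovers it
lemma pv_hexval (d : Nat) (h : d < 16) : pvHexVal (pvHexDigit d) = d := by
  interval_cases d <;> rfl

-- two adjacent base-16 digits assemble into one base-256 digit
lemma pv_pair (q : Nat) : 16 * (q / 16 % 16) + q % 16 = q % 256 := by omega

-- specialisation of pv_hexval usable by simp (a mod-16 value is < 16)
lemma pv_hexval' (m e : Nat) : pvHexVal (pvHexDigit (m / e % 16)) = m / e % 16 :=
  pv_hexval _ (Nat.mod_lt _ (by norm_num))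

-- one component: A's byte k equals B's decoded hex pair
lemma pv_comp (m k : Nat) :
    ((m / 256 ^ k % 256 : Nat) : Int)
      = 16 * (16 * 0 + (pvHexVal (pvHexDigit (m / 16 ^ (2 * k + 1) % 16)) : Int))
          + (pvHexVal (pvHexDigit (m / 16 ^ (2 * k) % 16)) : Int) := by
  rw [pv_hexval', pv_hexval']
  have h1 : m / 16 ^ (2 * k + 1) = m / 16 ^ (2 * k) / 16 := by
    rw [Nat.div_div_eq_div_mul, pow_succ]
  have h2 : (256 : Nat) ^ k = 16 ^ (2 * k) := by
    rw [show (256 : Nat) = 16 ^ 2 from rfl, ← pow_mul, Nat.mul_comm]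
  rw [h1, h2, ← pv_pair (m / 16 ^ (2 * k))]
  push_cast
  ring

-- ===== VERDICT (by name: the statement is the Claim_ definition above) =====
theorem decimal_vers_ip_spec : Claim_equal_decimal_vers_ip := by
  intro v _
  unfold Spec_decimal_vers_ip decimal_vers_ip decimal_vers_ip_alt
  by_cases h : 0 ≤ v ∧ v ≤ 4294967295
  · obtain ⟨h0, hub⟩ := h
    obtain ⟨m, rfl⟩ := Int.eq_ofNat_of_zero_le h0
    have hc : ¬¬(0 ≤ ((m : Nat) : Int) ∧ ((m : Nat) : Int) ≤ 4294967295) := by omega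
    rw [if_neg hc, if_neg hc]
    congr 1
    show ((PySem.List.pyRange 0 4 1).reverse).map
          (fun i => PySem.Int.toStr (PySem.Int.band ((m : Int) >>> (8 * i).toNat) 255))
        = _
    rw [show ((m : Int)).toNat = m from rfl]
    rw [show ((PySem.List.pyRange 0 4 1).reverse).map
          (fun i => PySem.Int.toStr (PySem.Int.band ((m : Int) >>> (8 * i).toNat) 255))
        = [PySem.Int.toStr (PySem.Int.band ((m : Int) >>> (8 * (3 : Nat))) 255),
           PySem.Int.toStr (PySem.Int.band ((m : Int) >>> (8 * (2 : Nat))) 255),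
           PySem.Int.toStr (PySem.Int.band ((m : Int) >>> (8 * (1 : Nat))) 255),
           PySem.Int.toStr (PySem.Int.band ((m : Int) >>> (8 * (0 : Nat))) 255)] from rfl]
    rw [show (([0, 2, 4, 6] : List Int)).map
          (fun i => PySem.Int.toStr (pvHexParse (PySem.List.slice (pvHex8 m) (some i) (some (i + 2)))))
        = [PySem.Int.toStr (16 * (16 * 0 + (pvHexVal (pvHexDigit (m / 16 ^ 7 % 16)) : Int)) + (pvHexVal (pvHexDigit (m / 16 ^ 6 % 16)) : Int)),
           PySem.Int.toStr (16 * (16 * 0 + (pvHexVal (pvHexDigit (m / 16 ^ 5 % 16)) : Int)) + (pvHexVal (pvHexDigit (m / 16 ^ 4 % 16)) : Int)),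
           PySem.Int.toStr (16 * (16 * 0 + (pvHexVal (pvHexDigit (m / 16 ^ 3 % 16)) : Int)) + (pvHexVal (pvHexDigit (m / 16 ^ 2 % 16)) : Int)),
           PySem.Int.toStr (16 * (16 * 0 + (pvHexVal (pvHexDigit (m / 16 ^ 1 % 16)) : Int)) + (pvHexVal (pvHexDigit (m / 16 ^ 0 % 16)) : Int))] from rfl]
    rw [pv_byte m 0, pv_byte m 1, pv_byte m 2, pv_byte m 3,
        pv_comp m 0, pv_comp m 1,
        pv_comp m 2, pv_comp m 3]
  · rw [if_pos h, if_pos h]
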